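-- pv_equiv track=rewrite | github.com/cuppajoeman/music-experimentation | scales/scale_analysis_figure_generator.py | sum_pat
-- ===== SOURCE A (Python) =====
-- def sum_pat(pattern, offset):
--     # Offset is where you start in the pattern
--     N = len(pattern)
--     new_pat = [""] * (N * 2)
--     s = 0
--     for i in range(N):
--       mark = "*" if i in (0, 2, 4, 6) else ""
--       # This makes it so it will thread between pattern
--       # p1 |    | p2 |    | p3 |    |
--       #    | s1 |    | s2 |    | s3 |
--       curr_pat_ele = pattern[(i + offset) % N]
--       pos =  2*(i + offset) % (N * 2)
--       new_pat[pos] = str(s) + mark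
--       s += curr_pat_ele
--
--     ## 7th chord analysis
--     #idxs = []
--     #for c, itv in seventh_chord_to_interval.items():
--     #    contained = set(itv).issubset(set([int(x) for x in new_pat if x != ""]))
--     #    if contained:
--     #        for i in range(len(new_pat)):
--     #            if new_pat[i] != "" and int(new_pat[i]) in itv:
--     #                idxs.append(i)
--     #        break
--     #for i in idxs:
--     #    new_pat[i] += "*"
--
--     return new_pat
-- ===== SOURCE B (Python) =====
-- def sum_pat(pattern, offset):
--     # B: iterate over OUTPUT slots instead of iterations: precompute the rotated
--     # partial-sum table, then place sums[(k-offset)%N] at slot 2k.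
--     N = len(pattern)
--     sums = [0]
--     for j in range(N - 1):
--         sums.append(sums[-1] + pattern[(j + offset) % N])
--     out = [""] * (2 * N)
--     for k in range(N):
--         i = (k - offset) % N
--         out[2 * k] = str(sums[i]) + ("*" if i % 2 == 0 and i < 8 else "")
--     return out
-- ===== Notes on version B (the rewrite author's own statement) =====
-- stated objective: alternative
-- what changed: B inverts the driving index: it first builds the table of rotated partial sums in a separate pass, then iterates over output slots k, recovering i = (k - offset) % N and writing sums[i] with its marker at index 2*k, instead of A's single loop over iterations that threads a running sum and scatters through the position formula 2*(i+offset) % (2N).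
import Mathlib
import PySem

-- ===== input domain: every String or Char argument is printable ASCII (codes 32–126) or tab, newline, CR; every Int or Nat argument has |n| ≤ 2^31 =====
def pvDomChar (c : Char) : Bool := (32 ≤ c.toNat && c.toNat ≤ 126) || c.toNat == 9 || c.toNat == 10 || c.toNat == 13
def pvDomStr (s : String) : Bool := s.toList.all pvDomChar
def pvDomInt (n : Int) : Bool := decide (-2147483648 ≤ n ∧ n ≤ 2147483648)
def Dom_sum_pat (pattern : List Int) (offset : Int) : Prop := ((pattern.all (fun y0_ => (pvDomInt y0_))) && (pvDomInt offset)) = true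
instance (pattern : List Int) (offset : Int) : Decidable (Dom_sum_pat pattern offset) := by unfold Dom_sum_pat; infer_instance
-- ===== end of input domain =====

-- B iterates over output slots (placing precomputed rotated partial sums) instead of driving
-- everything by the iteration index; same cost, different decomposition ("alternative").

-- ===== PORT A =====
def sum_pat (pattern : List Int) (offset : Int) : List String :=
  let N : Int := pattern.length
  (((PySem.List.pyRange 0 N 1).foldl (fun (st : List String × Int) i =>
      let mark : String := if i = 0 ∨ i = 2 ∨ i = 4 ∨ i = 6 then "*" else ""
      let curr := PySem.List.pyGetD pattern (PySem.Int.mod (i + offset) N) 0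
      let pos := PySem.Int.mod (2 * (i + offset)) (N * 2)
      (PySem.List.pySetD st.1 pos (PySem.Int.toStr st.2 ++ mark), st.2 + curr))
    (List.replicate (pattern.length * 2) "", (0 : Int)))).1

-- ===== PORT B =====
def sum_pat_alt (pattern : List Int) (offset : Int) : List String :=
  let N : Int := pattern.length
  let sums : List Int := (PySem.List.pyRange 0 (N - 1) 1).foldl (fun acc j =>
      acc ++ [PySem.List.pyGetD acc (-1) 0 + PySem.List.pyGetD pattern (PySem.Int.mod (j + offset) N) 0])
    [(0 : Int)]
  (PySem.List.pyRange 0 N 1).foldl (fun arr k =>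
      let i := PySem.Int.mod (k - offset) N
      PySem.List.pySetD arr (2 * k)
        (PySem.Int.toStr (PySem.List.pyGetD sums i 0) ++
          (if PySem.Int.mod i 2 = 0 ∧ i < 8 then "*" else "")))
    (List.replicate (2 * pattern.length) "")

-- ===== PRECONDITION & SPEC =====
def Spec_sum_pat (pattern : List Int) (offset : Int) (out : List String) : Prop := out = sum_pat_alt pattern offset
instance (pattern : List Int) (offset : Int) (out : List String) : Decidable (Spec_sum_pat pattern offset out) := by unfold Spec_sum_pat; infer_instance

-- ===== CLAIM (what is proved, stated in full; the proofs are below) =====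
def Claim_equal_sum_pat : Prop := ∀ (pattern : List Int) (offset : Int), Dom_sum_pat pattern offset → Spec_sum_pat pattern offset (sum_pat pattern offset)

-- ===== LEMMAS AND PROOFS =====

-- element added to the running sum at iteration t, and the partial sums
def pvElem (pattern : List Int) (offset : Int) (t : Nat) : Int :=
  PySem.List.pyGetD pattern (PySem.Int.mod ((t : Int) + offset) (pattern.length : Int)) 0

def pvSum (pattern : List Int) (offset : Int) : Nat → Int
  | 0 => 0
  | t + 1 => pvSum pattern offset t + pvElem pattern offset t

-- index maps between A's iteration index t and B's output slot k
def pvIA (pattern : List Int) (offset : Int) (t : Nat) : Nat :=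
  (PySem.Int.mod ((t : Int) + offset) (pattern.length : Int)).toNat
def pvIB (pattern : List Int) (offset : Int) (k : Nat) : Nat :=
  (PySem.Int.mod ((k : Int) - offset) (pattern.length : Int)).toNat

def pvMark (t : Nat) : String := if t = 0 ∨ t = 2 ∨ t = 4 ∨ t = 6 then "*" else ""

-- the (position, value) write lists the two loops perform
def pvWritesA (pattern : List Int) (offset : Int) : List (Nat × String) :=
  (List.range pattern.length).map (fun t =>
    (2 * pvIA pattern offset t, PySem.Int.toStr (pvSum pattern offset t) ++ pvMark t))
def pvWritesB (pattern : List Int) (offset : Int) : List (Nat × String) :=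
  (List.range pattern.length).map (fun k =>
    (2 * k, PySem.Int.toStr (pvSum pattern offset (pvIB pattern offset k)) ++ pvMark (pvIB pattern offset k)))

-- a fold of List.set writes, read back element-wise: last write wins
theorem pv_foldl_set_getElem? {α : Type} (writes : List (Nat × α)) (arr : List α) (m : Nat) :
    (writes.foldl (fun a pv => a.set pv.1 pv.2) arr)[m]? =
      match writes.reverse.find? (fun pv => pv.1 == m) with
      | some pv => if m < arr.length then some pv.2 else none
      | none => arr[m]? := by
  induction writes generalizing arr with
  | nil => simp
  | cons w ws ih =>
    rw [List.foldl_cons, ih]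
    rw [List.reverse_cons, List.find?_append]
    cases hf : ws.reverse.find? (fun pv => pv.1 == m) with
    | some pv => simp [hf]
    | none =>
      simp only [hf, Option.none_or]
      by_cases hw : w.1 = m
      · subst hw
        simp [List.getElem?_set, List.find?]
      · have hb : (w.1 == m) = false := by simpa using hw
        simp [hb, List.getElem?_set_ne hw]

theorem pv_find?_key {α : Type} (l : List (Nat × α)) (h : (l.map Prod.fst).Nodup) (m : Nat)
    (x : Nat × α) (hx : x ∈ l) (hxm : x.1 = m) :
    l.find? (fun pv => pv.1 == m) = some x := by
  cases hf : l.find? (fun pv => pv.1 == m) with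
  | none =>
    rw [List.find?_eq_none] at hf
    exact absurd (by simpa using hxm) (hf x hx)
  | some y =>
    have hy := List.find?_some hf
    have hymem := List.mem_of_find?_eq_some hf
    have hxy : x = y := by
      apply List.inj_on_of_nodup_map h hx hymem
      simp at hy
      rw [hxm, hy]
    rw [hxy]

-- with nodup keys, find? is determined by membership
theorem pv_find?_eq {α : Type} (l₁ l₂ : List (Nat × α))
    (_h₁ : (l₁.map Prod.fst).Nodup) (h₂ : (l₂.map Prod.fst).Nodup)
    (hmem : ∀ pv : Nat × α, pv ∈ l₁ ↔ pv ∈ l₂) (m : Nat) :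
    l₁.find? (fun pv => pv.1 == m) = l₂.find? (fun pv => pv.1 == m) := by
  cases hf : l₁.find? (fun pv => pv.1 == m) with
  | some x =>
    have hx1 := List.mem_of_find?_eq_some hf
    have hx := List.find?_some hf
    simp at hx
    exact (pv_find?_key l₂ h₂ m x ((hmem x).mp hx1) hx).symm
  | none =>
    symm
    rw [List.find?_eq_none] at hf ⊢
    intro x hx
    exact hf x ((hmem x).mpr hx)

theorem pv_mod2 (x N : Int) (h : 0 < N) :
    PySem.Int.mod (2 * x) (N * 2) = 2 * PySem.Int.mod x N := by
  rw [PySem.Int.mod_eq_emod_of_pos (show (0:Int) < N*2 by omega), PySem.Int.mod_eq_emod_of_pos h]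
  rw [mul_comm N 2]
  exact Int.mul_emod_mul_of_pos x N (by omega)

theorem pv_emod_sub_add (t offset N : Int) (h0 : 0 ≤ t) (hN : t < N) :
    ((t + offset) % N - offset) % N = t := by
  conv_lhs => rw [Int.sub_emod, Int.emod_emod_of_dvd _ dvd_rfl, ← Int.sub_emod, add_sub_cancel_right]
  exact Int.emod_eq_of_lt h0 hN

theorem pv_emod_add_sub (k offset N : Int) (h0 : 0 ≤ k) (hN : k < N) :
    ((k - offset) % N + offset) % N = k := by
  conv_lhs => rw [Int.add_emod, Int.emod_emod_of_dvd _ dvd_rfl, ← Int.add_emod, sub_add_cancel]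
  exact Int.emod_eq_of_lt h0 hN

theorem pv_IB_IA (pattern : List Int) (offset : Int) (t : Nat) (ht : t < pattern.length) :
    pvIB pattern offset (pvIA pattern offset t) = t := by
  unfold pvIA pvIB
  have hN : (0:Int) < pattern.length := by omega
  rw [PySem.Int.mod_eq_emod_of_pos hN, PySem.Int.mod_eq_emod_of_pos hN]
  have h1 := Int.emod_nonneg ((t : Int) + offset) hN.ne'
  rw [Int.toNat_of_nonneg h1]
  rw [pv_emod_sub_add _ _ _ (by omega) (by exact_mod_cast ht)]
  omega

theorem pv_IA_IB (pattern : List Int) (offset : Int) (k : Nat) (hk : k < pattern.length) :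
    pvIA pattern offset (pvIB pattern offset k) = k := by
  unfold pvIA pvIB
  have hN : (0:Int) < pattern.length := by omega
  rw [PySem.Int.mod_eq_emod_of_pos hN, PySem.Int.mod_eq_emod_of_pos hN]
  have h1 := Int.emod_nonneg ((k : Int) - offset) hN.ne'
  rw [Int.toNat_of_nonneg h1]
  rw [pv_emod_add_sub _ _ _ (by omega) (by exact_mod_cast hk)]
  omega

theorem pv_IA_lt (pattern : List Int) (offset : Int) (t : Nat) (h : 0 < pattern.length) :
    pvIA pattern offset t < pattern.length := by
  unfold pvIA
  rw [PySem.Int.mod_eq_emod_of_pos (by exact_mod_cast h)]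
  have h1 := Int.emod_nonneg ((t : Int) + offset) (show (pattern.length : Int) ≠ 0 by exact_mod_cast h.ne')
  have h2 := Int.emod_lt_of_pos ((t : Int) + offset) (show (0:Int) < pattern.length by exact_mod_cast h)
  omega

theorem pv_IB_lt (pattern : List Int) (offset : Int) (k : Nat) (h : 0 < pattern.length) :
    pvIB pattern offset k < pattern.length := by
  unfold pvIB
  rw [PySem.Int.mod_eq_emod_of_pos (by exact_mod_cast h)]
  have h1 := Int.emod_nonneg ((k : Int) - offset) (show (pattern.length : Int) ≠ 0 by exact_mod_cast h.ne')
  have h2 := Int.emod_lt_of_pos ((k : Int) - offset) (show (0:Int) < pattern.length by exact_mod_cast h)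
  omega

theorem pv_A_loop (pattern : List Int) (offset : Int) (t : Nat) (ht : t ≤ pattern.length) :
    ((List.range t).map (fun k : Nat => (k : Int))).foldl
      (fun (st : List String × Int) i =>
        (PySem.List.pySetD st.1 (PySem.Int.mod (2 * (i + offset)) ((pattern.length : Int) * 2))
            (PySem.Int.toStr st.2 ++ (if i = 0 ∨ i = 2 ∨ i = 4 ∨ i = 6 then "*" else "")),
         st.2 + PySem.List.pyGetD pattern (PySem.Int.mod (i + offset) (pattern.length : Int)) 0))
      (List.replicate (pattern.length * 2) "", (0 : Int))
    = (((List.range t).map (fun u => (2 * pvIA pattern offset u,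
          PySem.Int.toStr (pvSum pattern offset u) ++ pvMark u))).foldl
        (fun a pv => a.set pv.1 pv.2) (List.replicate (pattern.length * 2) ""),
       pvSum pattern offset t) := by
  induction t with
  | zero => simp [pvSum]
  | succ t ih =>
    have hlt : t < pattern.length := ht
    have hN : (0:Int) < pattern.length := by exact_mod_cast Nat.pos_of_ne_zero (by omega)
    rw [List.range_succ, List.map_append, List.foldl_append, ih (by omega),
        List.map_append, List.foldl_append]
    simp only [List.map_cons, List.map_nil, List.foldl_cons, List.foldl_nil]
    have hmark : ((t:Int) = 0 ∨ (t:Int) = 2 ∨ (t:Int) = 4 ∨ (t:Int) = 6) ↔ (t = 0 ∨ t = 2 ∨ t = 4 ∨ t = 6) := by omega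
    have hmn := PySem.Int.mod_nonneg ((t:Int) + offset) hN
    refine Prod.ext ?_ rfl
    simp only
    rw [pv_mod2 _ _ hN, PySem.List.pySetD_of_nonneg _ _ (show (0:Int) ≤ 2 * PySem.Int.mod ((t:Int)+offset) (pattern.length:Int) by omega)]
    congr 1
    · unfold pvIA; omega
    · rw [if_congr hmark rfl rfl]; rfl

theorem pv_sums_loop (pattern : List Int) (offset : Int) (t : Nat) :
    ((List.range t).map (fun k : Nat => (k : Int))).foldl
      (fun acc j => acc ++ [PySem.List.pyGetD acc (-1) 0 +
        PySem.List.pyGetD pattern (PySem.Int.mod (j + offset) (pattern.length : Int)) 0])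
      [(0 : Int)]
    = (List.range (t + 1)).map (pvSum pattern offset) := by
  induction t with
  | zero => simp [pvSum]
  | succ t ih =>
    rw [List.range_succ, List.map_append, List.foldl_append, ih]
    simp only [List.map_cons, List.map_nil, List.foldl_cons, List.foldl_nil]
    have hne : (List.range (t + 1)).map (pvSum pattern offset) ≠ [] := by simp
    rw [PySem.List.pyGetD_neg_one _ _ hne]
    rw [List.range_succ (n := t + 1), List.map_append]
    congr 1
    simp [List.getLast_eq_getElem, pvSum, pvElem]

theorem pv_sum_pat_eq (pattern : List Int) (offset : Int) :
    sum_pat pattern offset =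
      (pvWritesA pattern offset).foldl (fun a pv => a.set pv.1 pv.2)
        (List.replicate (pattern.length * 2) "") := by
  simp only [sum_pat]
  rw [PySem.List.pyRange_zero_nat, pv_A_loop pattern offset pattern.length le_rfl]
  rfl

theorem pv_sum_pat_alt_eq (pattern : List Int) (offset : Int) :
    sum_pat_alt pattern offset =
      (pvWritesB pattern offset).foldl (fun a pv => a.set pv.1 pv.2)
        (List.replicate (pattern.length * 2) "") := by
  rcases Nat.eq_zero_or_pos pattern.length with h0 | hpos
  · have hnil : pattern = [] := List.eq_nil_of_length_eq_zero h0
    subst hnil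
    simp [sum_pat_alt, pvWritesB, PySem.List.pyRange_one_eq_nil]
  · simp only [sum_pat_alt]
    have hc : ((pattern.length : Int) - 1) = ((pattern.length - 1 : Nat) : Int) := by omega
    rw [hc, PySem.List.pyRange_zero_nat, pv_sums_loop,
        Nat.sub_add_cancel hpos, PySem.List.pyRange_zero_nat]
    unfold pvWritesB
    rw [List.foldl_map, List.foldl_map]
    have hlen : pattern.length * 2 = 2 * pattern.length := by omega
    rw [← hlen]
    apply PySem.List.foldl_congr_mem
    intro arr k hk
    rw [List.mem_range] at hk
    have hN : (0:Int) < pattern.length := by exact_mod_cast hpos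
    have hi0 := PySem.Int.mod_nonneg ((k:Int) - offset) hN
    have hilt := PySem.Int.mod_lt ((k:Int) - offset) hN
    simp only
    rw [PySem.List.pySetD_of_nonneg _ _ (by omega : (0:Int) ≤ 2 * (k:Int))]
    have htn : (2 * (k:Int)).toNat = 2 * k := by omega
    rw [htn]
    congr 1
    congr 1
    · congr 1
      rw [PySem.List.pyGetD_eq_getElem _ _ hi0 (by simpa using hilt)]
      simp [pvIB, List.getElem_map, List.getElem_range]
    · have hcast : PySem.Int.mod ((k:Int) - offset) (pattern.length:Int) = ((pvIB pattern offset k : Nat) : Int) := by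
        unfold pvIB; omega
      rw [hcast, pvMark]
      have hiff : (PySem.Int.mod ((pvIB pattern offset k : Nat) : Int) 2 = 0 ∧ ((pvIB pattern offset k : Nat) : Int) < 8)
          ↔ (pvIB pattern offset k = 0 ∨ pvIB pattern offset k = 2 ∨ pvIB pattern offset k = 4 ∨ pvIB pattern offset k = 6) := by
        rw [PySem.Int.mod_eq_emod_of_pos (by omega : (0:Int) < 2)]
        omega
      rw [if_congr hiff rfl rfl]

theorem pv_nodupA (pattern : List Int) (offset : Int) :
    ((pvWritesA pattern offset).map Prod.fst).Nodup := by
  unfold pvWritesA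
  rw [List.map_map]
  apply List.Nodup.map_on _ (List.nodup_range)
  intro a ha b hb hab
  rw [List.mem_range] at ha hb
  simp only [Function.comp] at hab
  have h2 : pvIA pattern offset a = pvIA pattern offset b := by omega
  calc a = pvIB pattern offset (pvIA pattern offset a) := (pv_IB_IA pattern offset a ha).symm
    _ = pvIB pattern offset (pvIA pattern offset b) := by rw [h2]
    _ = b := pv_IB_IA pattern offset b hb

theorem pv_nodupB (pattern : List Int) (offset : Int) :
    ((pvWritesB pattern offset).map Prod.fst).Nodup := by
  unfold pvWritesB
  rw [List.map_map]
  apply List.Nodup.map_on _ (List.nodup_range)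
  intro a ha b hb hab
  simp only [Function.comp] at hab
  omega

theorem pv_mem_iff (pattern : List Int) (offset : Int) (pv : Nat × String) :
    pv ∈ pvWritesA pattern offset ↔ pv ∈ pvWritesB pattern offset := by
  unfold pvWritesA pvWritesB
  simp only [List.mem_map, List.mem_range]
  constructor
  · rintro ⟨t, ht, rfl⟩
    exact ⟨pvIA pattern offset t, pv_IA_lt pattern offset t (by omega),
      by rw [pv_IB_IA pattern offset t ht]⟩
  · rintro ⟨k, hk, rfl⟩
    exact ⟨pvIB pattern offset k, pv_IB_lt pattern offset k (by omega),
      by rw [pv_IA_IB pattern offset k hk]⟩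

-- ===== VERDICT (by name: the statement is the Claim_ definition above) =====
theorem sum_pat_spec : Claim_equal_sum_pat := by
  intro pattern offset _
  unfold Spec_sum_pat
  rw [pv_sum_pat_eq, pv_sum_pat_alt_eq]
  apply List.ext_getElem?
  intro m
  rw [pv_foldl_set_getElem?, pv_foldl_set_getElem?]
  rw [pv_find?_eq (pvWritesA pattern offset).reverse (pvWritesB pattern offset).reverse
      (by rw [List.map_reverse]; exact List.nodup_reverse.mpr (pv_nodupA pattern offset))
      (by rw [List.map_reverse]; exact List.nodup_reverse.mpr (pv_nodupB pattern offset))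
      (by intro pv; simpa using pv_mem_iff pattern offset pv)]
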